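-- pv_equiv track=rewrite | github.com/pypi-data/pypi-mirror-78 | packages/cyr/cyr-0.0.1.tar.gz/cyr-0.0.1/cyr/cyr.py | textToList
-- ===== SOURCE A (Python) =====
-- critical_latin = ['s', 'z', 'c']
--
-- two_letter_letter = ['nj', 'lj', 'dz', 'dj']
--
-- def alpha_or_ws(x):
--     if x == ' ':
--         return True
--     return x.isalpha()
--
-- def textToList(text):
--     l = len(text)
--     text += ' '
--     caps = []
--     huks = {}
--     news = []
--     orig = []
--     i = 0
--     while i < l:
--         if not alpha_or_ws(text[i]):
--             orig.append(text[i])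
--             i += 1
--             continue
--         if text[i] != ' ':
--             caps.append(1 if text[i].isupper() else 0)
--         if text[i:i+2].lower() in two_letter_letter:
--             news.append(text[i:i+2].lower())
--             orig.append(text[i:i+2].lower())
--             i += 2
--             continue
--         if text[i].lower() in critical_latin:
--             huks[i] = text[i].lower()
--         news.append(text[i].lower())
--         orig.append(text[i].lower())
--         i += 1
--     return caps, huks, news, orig
-- ===== SOURCE B (Python) =====
-- critical_latin = ['s', 'z', 'c']
--
-- two_letter_letter = ['nj', 'lj', 'dz', 'dj']
--
-- def textToList(text):
--     # pass 1: segment the text into tokens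
--     tokens = []
--     n = len(text)
--     i = 0
--     while i < n:
--         c = text[i]
--         if c != ' ' and not c.isalpha():
--             tokens.append(('other', i, c))
--             i += 1
--         else:
--             pair = text[i:i+2].lower()
--             if pair in two_letter_letter:
--                 tokens.append(('digraph', i, pair, c.isupper()))
--                 i += 2
--             else:
--                 tokens.append(('single', i, c))
--                 i += 1
--     # pass 2: fold the tokens into the four outputs
--     caps = []
--     huks = {}
--     news = []
--     orig = []
--     for t in tokens:
--         kind = t[0]
--         if kind == 'other':
--             orig.append(t[2])
--         elif kind == 'digraph':
--             caps.append(1 if t[3] else 0)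
--             news.append(t[2])
--             orig.append(t[2])
--         else:
--             c = t[2]
--             if c != ' ':
--                 caps.append(1 if c.isupper() else 0)
--             lc = c.lower()
--             if lc in critical_latin:
--                 huks[t[1]] = lc
--             news.append(lc)
--             orig.append(lc)
--     return caps, huks, news, orig
-- ===== Notes on version B (the rewrite author's own statement) =====
-- stated objective: alternative
-- what changed: B replaces A's single index-stepping while-loop that interleaves scanning and output-building with a two-phase pipeline: a first pass segments the text into a token list (other / digraph / single), and a second pass folds the tokens into the four outputs.
import Mathlib
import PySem

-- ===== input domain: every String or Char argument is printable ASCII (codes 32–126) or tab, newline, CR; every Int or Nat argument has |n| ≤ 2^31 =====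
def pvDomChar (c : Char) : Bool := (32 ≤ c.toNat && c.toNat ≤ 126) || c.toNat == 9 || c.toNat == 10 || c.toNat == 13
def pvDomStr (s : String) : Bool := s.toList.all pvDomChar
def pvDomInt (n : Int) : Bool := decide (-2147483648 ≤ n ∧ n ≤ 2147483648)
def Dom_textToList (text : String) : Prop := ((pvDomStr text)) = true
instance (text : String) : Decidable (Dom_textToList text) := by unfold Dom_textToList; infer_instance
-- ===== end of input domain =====

-- B re-decomposes A's single scanning-and-building while loop into a tokenize pass followed by a fold over the tokens (objective: alternative decomposition; same O(n) cost).

-- ===== PORT A =====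
-- module-level constants (shared by both Python files)
def critLatin : List Char := ['s', 'z', 'c']
def twoLetter : List (List Char) := [['n','j'], ['l','j'], ['d','z'], ['d','j']]

def alphaOrWs (x : Char) : Bool :=
  if x = ' ' then true else PySem.Chars.isalpha x

-- A's while loop; cs is the padded character list (text + ' '), l the original length.
-- text[i] is read with getD: exact here, since the loop only reads at 0 ≤ i < l < cs.length.
def loopA (cs : List Char) (l : Nat) (i : Nat) (caps : List Int)
    (huks : PySem.Dict Int String) (news orig : List String) :
    List Int × (List (Int × String)) × List String × List String :=
  if h : i < l then
    let c := cs.getD i ' '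
    if !(alphaOrWs c) then
      loopA cs l (i + 1) caps huks news (orig ++ [String.mk [c]])
    else
      let caps' := if c ≠ ' ' then caps ++ [if PySem.Chars.isupper c then (1 : Int) else 0] else caps
      let pair := (PySem.List.slice cs (some (i : Int)) (some ((i + 2 : Nat) : Int))).map PySem.Chars.lowerChar
      if pair ∈ twoLetter then
        loopA cs l (i + 2) caps' huks (news ++ [String.mk pair]) (orig ++ [String.mk pair])
      else
        let lc := PySem.Chars.lowerChar c
        let huks' := if lc ∈ critLatin then huks.insert (i : Int) (String.mk [lc]) else huks
        loopA cs l (i + 1) caps' huks' (news ++ [String.mk [lc]]) (orig ++ [String.mk [lc]])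
  else (caps, huks.items, news, orig)
termination_by l - i

def textToList (text : String) : List Int × (List (Int × String)) × List String × List String :=
  loopA (text.toList ++ [' ']) text.toList.length 0 [] PySem.Dict.empty [] []

-- ===== PORT B =====
inductive Tok where
  | other : Char → Tok
  | digraph : Nat → List Char → Bool → Tok
  | single : Nat → Char → Tok
deriving DecidableEq, Repr

-- B's pass 1: segment the (unpadded) text into tokens
def tokenize (cs : List Char) (n : Nat) (i : Nat) : List Tok :=
  if h : i < n then
    let c := cs.getD i ' '
    if (c != ' ') && !(PySem.Chars.isalpha c) then
      Tok.other c :: tokenize cs n (i + 1)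
    else
      let pair := (PySem.List.slice cs (some (i : Int)) (some ((i + 2 : Nat) : Int))).map PySem.Chars.lowerChar
      if pair ∈ twoLetter then
        Tok.digraph i pair (PySem.Chars.isupper c) :: tokenize cs n (i + 2)
      else
        Tok.single i c :: tokenize cs n (i + 1)
  else []
termination_by n - i

-- B's pass 2 body: fold one token into the four accumulators
def step2 (st : List Int × PySem.Dict Int String × List String × List String) (t : Tok) :
    List Int × PySem.Dict Int String × List String × List String :=
  match st, t with
  | (caps, huks, news, orig), Tok.other c => (caps, huks, news, orig ++ [String.mk [c]])
  | (caps, huks, news, orig), Tok.digraph _ pr up =>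
      (caps ++ [if up then (1 : Int) else 0], huks, news ++ [String.mk pr], orig ++ [String.mk pr])
  | (caps, huks, news, orig), Tok.single i c =>
      let caps' := if c ≠ ' ' then caps ++ [if PySem.Chars.isupper c then (1 : Int) else 0] else caps
      let lc := PySem.Chars.lowerChar c
      let huks' := if lc ∈ critLatin then huks.insert (i : Int) (String.mk [lc]) else huks
      (caps', huks', news ++ [String.mk [lc]], orig ++ [String.mk [lc]])

def textToList_alt (text : String) : List Int × (List (Int × String)) × List String × List String :=
  match (tokenize text.toList text.toList.length 0).foldl step2 ([], PySem.Dict.empty, [], []) with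
  | (caps, huks, news, orig) => (caps, huks.items, news, orig)

-- ===== PRECONDITION & SPEC =====
def Spec_textToList (text : String) (out : List Int × (List (Int × String)) × List String × List String) : Prop := out = textToList_alt text
instance (text : String) (out : List Int × (List (Int × String)) × List String × List String) : Decidable (Spec_textToList text out) := by unfold Spec_textToList; infer_instance

-- ===== CLAIM (what is proved, stated in full; the proofs are below) =====
def Claim_equal_textToList : Prop := ∀ (text : String), Dom_textToList text → Spec_textToList text (textToList text)

-- ===== LEMMAS AND PROOFS =====

-- proof-side: project the dict state to the returned association list
def finish (st : List Int × PySem.Dict Int String × List String × List String) :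
    List Int × (List (Int × String)) × List String × List String :=
  (st.1, st.2.1.items, st.2.2.1, st.2.2.2)

lemma notAlphaOrWs (c : Char) : (!(alphaOrWs c)) = ((c != ' ') && !(PySem.Chars.isalpha c)) := by
  by_cases h : c = ' ' <;> simp [alphaOrWs, h]

lemma getD_pad (cs : List Char) (i : Nat) (h : i < cs.length) :
    (cs ++ [' ']).getD i ' ' = cs.getD i ' ' := by
  simp [List.getD, List.getElem?_append_left h]

lemma slice_take (cs : List Char) (i : Nat) :
    PySem.List.slice cs (some (i : Int)) (some ((i + 2 : Nat) : Int)) = (cs.drop i).take 2 := by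
  rw [PySem.List.slice_natCast]
  congr 1
  omega

lemma pad_pair (cs : List Char) (i : Nat) (h : i + 1 < cs.length) :
    ((cs ++ [' ']).drop i).take 2 = (cs.drop i).take 2 := by
  rw [List.drop_append_of_le_length (by omega), List.take_append_of_le_length (by simp; omega)]

lemma singleton_not_mem (x : Char) : [x] ∉ twoLetter := by
  simp [twoLetter]

lemma pair_space_not_mem (x : Char) : [x, ' '] ∉ twoLetter := by
  simp [twoLetter]

lemma mem_twoLetter_ne_space (c : Char) (r : List Char)
    (h : (PySem.Chars.lowerChar c :: r) ∈ twoLetter) : c ≠ ' ' := by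
  intro hc
  subst hc
  simp [twoLetter] at h
  rcases h with ⟨h1, _⟩ | ⟨h1, _⟩ | ⟨h1, _⟩ | ⟨h1, _⟩ <;> revert h1 <;> decide

lemma loopA_eq_foldl (k : Nat) : ∀ (cs : List Char) (i : Nat), cs.length - i ≤ k →
    ∀ caps huks news orig,
    loopA (cs ++ [' ']) cs.length i caps huks news orig =
      finish ((tokenize cs cs.length i).foldl step2 (caps, huks, news, orig)) := by
  induction k with
  | zero =>
    intro cs i hk caps huks news orig
    have hi : ¬ i < cs.length := by omega
    rw [loopA, tokenize, dif_neg hi, dif_neg hi]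
    rfl
  | succ k ih =>
    intro cs i hk caps huks news orig
    by_cases hi : i < cs.length
    · rw [loopA, tokenize, dif_pos hi, dif_pos hi]
      simp only [getD_pad cs i hi, notAlphaOrWs]
      set c := cs.getD i ' ' with hc
      by_cases hoth : ((c != ' ') && !(PySem.Chars.isalpha c)) = true
      · rw [if_pos hoth, if_pos hoth, List.foldl_cons]
        rw [ih cs (i + 1) (by omega)]
        rfl
      · rw [if_neg hoth, if_neg hoth]
        -- the two sliced pairs
        rw [slice_take (cs ++ [' ']) i, slice_take cs i]
        have hdrop : cs.drop i = c :: cs.drop (i + 1) := by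
          rw [List.drop_eq_getElem_cons hi]
          congr 1
          rw [hc]
          simp [List.getD, List.getElem?_eq_getElem hi]
        by_cases hb : i + 1 < cs.length
        · rw [pad_pair cs i hb]
          by_cases hdg : ((cs.drop i).take 2).map PySem.Chars.lowerChar ∈ twoLetter
          · rw [if_pos hdg, if_pos hdg, List.foldl_cons]
            have hcne : c ≠ ' ' := by
              have h2 : (cs.drop i).take 2 = c :: (cs.drop (i+1)).take 1 := by
                rw [hdrop]; rfl
              rw [h2] at hdg
              exact mem_twoLetter_ne_space c _ (by simpa using hdg)
            rw [show step2 (caps, huks, news, orig)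
                  (Tok.digraph i (((cs.drop i).take 2).map PySem.Chars.lowerChar) (PySem.Chars.isupper c)) =
                  (caps ++ [if PySem.Chars.isupper c then (1 : Int) else 0], huks,
                   news ++ [String.mk (((cs.drop i).take 2).map PySem.Chars.lowerChar)],
                   orig ++ [String.mk (((cs.drop i).take 2).map PySem.Chars.lowerChar)]) from rfl]
            rw [ih cs (i + 2) (by omega), if_pos hcne]
          · rw [if_neg hdg, if_neg hdg, List.foldl_cons]
            rw [show step2 (caps, huks, news, orig) (Tok.single i c) =
                  (if c ≠ ' ' then caps ++ [if PySem.Chars.isupper c then (1 : Int) else 0] else caps,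
                   if PySem.Chars.lowerChar c ∈ critLatin then
                     huks.insert (i : Int) (String.mk [PySem.Chars.lowerChar c]) else huks,
                   news ++ [String.mk [PySem.Chars.lowerChar c]],
                   orig ++ [String.mk [PySem.Chars.lowerChar c]]) from rfl]
            rw [ih cs (i + 1) (by omega)]
        · -- i is the last index: the padded pair is [lower c, ' '], the unpadded one [lower c]; neither is a digraph
          have hlen : i + 1 = cs.length := by omega
          have hA : ((cs ++ [' ']).drop i).take 2 = [c, ' '] := by
            rw [List.drop_append_of_le_length (by omega), hdrop]
            have : cs.drop (i + 1) = [] := List.drop_eq_nil_of_le (by omega)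
            rw [this]
            rfl
          have hB : (cs.drop i).take 2 = [c] := by
            rw [hdrop]
            have : cs.drop (i + 1) = [] := List.drop_eq_nil_of_le (by omega)
            rw [this]
            rfl
          rw [hA, hB]
          have hsp : PySem.Chars.lowerChar ' ' = ' ' := by decide
          have hnA : ([c, ' '].map PySem.Chars.lowerChar) ∉ twoLetter := by
            simpa [hsp] using pair_space_not_mem (PySem.Chars.lowerChar c)
          have hnB : ([c].map PySem.Chars.lowerChar) ∉ twoLetter := by
            simpa using singleton_not_mem (PySem.Chars.lowerChar c)
          rw [if_neg hnA, if_neg hnB, List.foldl_cons]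
          rw [show step2 (caps, huks, news, orig) (Tok.single i c) =
                (if c ≠ ' ' then caps ++ [if PySem.Chars.isupper c then (1 : Int) else 0] else caps,
                 if PySem.Chars.lowerChar c ∈ critLatin then
                   huks.insert (i : Int) (String.mk [PySem.Chars.lowerChar c]) else huks,
                 news ++ [String.mk [PySem.Chars.lowerChar c]],
                 orig ++ [String.mk [PySem.Chars.lowerChar c]]) from rfl]
          rw [ih cs (i + 1) (by omega)]
    · rw [loopA, tokenize, dif_neg hi, dif_neg hi]
      rfl

-- ===== VERDICT (by name: the statement is the Claim_ definition above) =====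
theorem textToList_spec : Claim_equal_textToList := by
  intro text _
  unfold Spec_textToList textToList textToList_alt
  rw [loopA_eq_foldl text.toList.length text.toList 0 (by omega)]
  rcases h : (tokenize text.toList text.toList.length 0).foldl step2 ([], PySem.Dict.empty, [], []) with ⟨a, b, c, d⟩
  rfl
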